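-- pv_equiv track=rewrite | github.com/NightSkumbry/shvetsov | kompege/19/12108.py | f21
-- ===== SOURCE A (Python) =====
-- def f21(x, y, t=0):
--     if x + y >= 275:
--         if t in [2, 4]:
--             return True
--         return False
--     if t >= 4:
--         return False
--
--     a = [f21(x+7, y, t+1), f21(x+3, y, t+1), f21(x*4, y, t+1), f21(x, y+7, t+1), f21(x, y+3, t+1), f21(x, y*4, t+1)]
--
--     if t%2 == 0:
--         return all(a)
--     return any(a)
-- ===== SOURCE B (Python) =====
-- def f21(x, y, t=0):
--     # Iterative post-order evaluation of the game tree with an explicit stack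
--     # (no recursion); return value equals the recursive evaluation.
--     stack = [("eval", (x, y, t))]
--     results = []
--     while stack:
--         tag, node = stack.pop()
--         if tag == "eval":
--             nx, ny, nt = node
--             if nx + ny >= 275:
--                 results.append(nt == 2 or nt == 4)
--             elif nt >= 4:
--                 results.append(False)
--             else:
--                 stack.append(("comb", nt))
--                 for child in ((nx + 7, ny), (nx + 3, ny), (nx * 4, ny),
--                               (nx, ny + 7), (nx, ny + 3), (nx, ny * 4)):
--                     stack.append(("eval", (child[0], child[1], nt + 1)))
--         else:
--             nt = node
--             kids = [results.pop() for _ in range(6)]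
--             results.append(all(kids) if nt % 2 == 0 else any(kids))
--     return results[-1]
-- ===== Notes on version B (the rewrite author's own statement) =====
-- stated objective: alternative
-- what changed: Replaces the six-way recursive minimax evaluation with an iterative post-order traversal driven by an explicit frame stack and a separate value stack.
import Mathlib
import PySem

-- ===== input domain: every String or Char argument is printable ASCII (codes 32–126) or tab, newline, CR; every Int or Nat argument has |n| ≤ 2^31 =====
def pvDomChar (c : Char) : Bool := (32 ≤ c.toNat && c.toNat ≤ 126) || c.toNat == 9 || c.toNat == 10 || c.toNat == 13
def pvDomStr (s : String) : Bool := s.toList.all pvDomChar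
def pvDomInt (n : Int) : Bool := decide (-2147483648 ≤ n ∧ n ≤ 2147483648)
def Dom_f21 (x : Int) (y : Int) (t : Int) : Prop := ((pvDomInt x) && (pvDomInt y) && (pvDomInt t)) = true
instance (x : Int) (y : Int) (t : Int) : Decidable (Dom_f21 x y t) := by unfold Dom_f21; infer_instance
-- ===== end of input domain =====

-- ===== PORT A =====
-- fuel = (4 - t).toNat bounds the recursion depth (each call increases t until t ≥ 4);
-- the fuel-0 body is exactly A's code under t ≥ 4, which fuel 0 guarantees.
def f21go : Nat → Int → Int → Int → Bool
  | 0, x, y, t => if x + y ≥ 275 then (t == 2 || t == 4) else false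
  | n+1, x, y, t =>
    if x + y ≥ 275 then (t == 2 || t == 4)
    else if t ≥ 4 then false
    else
      let a := [f21go n (x+7) y (t+1), f21go n (x+3) y (t+1), f21go n (x*4) y (t+1),
                f21go n x (y+7) (t+1), f21go n x (y+3) (t+1), f21go n x (y*4) (t+1)]
      if t % 2 == 0 then a.all id else a.any id

def f21 (x : Int) (y : Int) (t : Int) : Bool := f21go (4 - t).toNat x y t

-- ===== PORT B =====
-- one stack frame of Source B: an "eval" entry (a position still to evaluate) or a
-- "comb" entry (a parent waiting to combine its six children's results)
inductive PvFrame where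
  | eval : Int → Int → Int → PvFrame
  | comb : Int → PvFrame
deriving DecidableEq, Repr

-- the while loop of Source B: stack of frames (head = top), results stack (head = last
-- pushed); the extra fuel argument only makes the loop total (f21_alt supplies
-- 2*7^(4-t).toNat, proved sufficient below, so the fuel-0 branch is never reached)
def pvRunGo : Nat → List PvFrame → List Bool → List Bool
  | 0, _, results => results
  | _+1, [], results => results
  | fuel+1, .eval nx ny nt :: stack, results =>
    if nx + ny ≥ 275 then
      pvRunGo fuel stack ((nt == 2 || nt == 4) :: results)
    else if nt ≥ 4 then
      pvRunGo fuel stack (false :: results)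
    else
      -- children pushed in source order, so the last-pushed (nx, ny*4) is on top
      pvRunGo fuel (.eval nx (ny*4) (nt+1) :: .eval nx (ny+3) (nt+1) :: .eval nx (ny+7) (nt+1) ::
                    .eval (nx*4) ny (nt+1) :: .eval (nx+3) ny (nt+1) :: .eval (nx+7) ny (nt+1) ::
                    .comb nt :: stack) results
  | fuel+1, .comb nt :: stack, results =>
    match results with
    | r1 :: r2 :: r3 :: r4 :: r5 :: r6 :: rest =>
      pvRunGo fuel stack ((if nt % 2 == 0 then [r1, r2, r3, r4, r5, r6].all id
                           else [r1, r2, r3, r4, r5, r6].any id) :: rest)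
    | results => results  -- unreachable (results.pop() would raise); totality guard only

def f21_alt (x : Int) (y : Int) (t : Int) : Bool :=
  match pvRunGo (2 * 7 ^ (4 - t).toNat) [.eval x y t] [] with
  | v :: _ => v     -- results[-1]: the most recently pushed value
  | [] => false     -- unreachable; totality guard only

-- ===== PRECONDITION & SPEC =====
-- Pre_ excludes very negative t with x + y < 275: there A's depth-first recursion
-- (depth 5 - t) overruns CPython's recursion limit and raises RecursionError
-- (observed from t = -994 down; a margin is left because the exact overflow point
-- depends on the caller's stack depth).
def Pre_f21 (x : Int) (y : Int) (t : Int) : Prop := x + y ≥ 275 ∨ -900 ≤ t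
instance (x : Int) (y : Int) (t : Int) : Decidable (Pre_f21 x y t) := by unfold Pre_f21; infer_instance
def pvWitness_f21 : Int × Int × Int := (10, 20, 0)
def Spec_f21 (x : Int) (y : Int) (t : Int) (out : Bool) : Prop := out = f21_alt x y t
instance (x : Int) (y : Int) (t : Int) (out : Bool) : Decidable (Spec_f21 x y t out) := by unfold Spec_f21; infer_instance

-- ===== CLAIM (what is proved, stated in full; the proofs are below) =====
def Claim_equal_f21 : Prop := ∀ (x : Int) (y : Int) (t : Int), Dom_f21 x y t → Pre_f21 x y t → Spec_f21 x y t (f21 x y t)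

-- ===== LEMMAS AND PROOFS =====

-- an empty frame stack returns the results stack, whatever the fuel
theorem pvRunGo_nil (f : Nat) (R : List Bool) : pvRunGo f [] R = R := by
  cases f <;> rfl

-- evaluating one position on top of the stack just pushes its recursive value,
-- consuming at most 2*7^(4-t).toNat fuel
theorem pvRunGo_eval : ∀ (n : Nat) (x y t : Int), (4 - t).toNat = n →
    ∀ (f : Nat) (S : List PvFrame) (R : List Bool), 2 * 7 ^ n ≤ f →
    ∃ f', f - 2 * 7 ^ n ≤ f' ∧
      pvRunGo f (.eval x y t :: S) R = pvRunGo f' S (f21go n x y t :: R) := by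
  intro n
  induction n using Nat.strong_induction_on with
  | _ n ih =>
    intro x y t hn f S R hf
    have hpow : 0 < 7 ^ n := by positivity
    obtain ⟨g, rfl⟩ : ∃ g, f = g + 1 := ⟨f - 1, by omega⟩
    by_cases h1 : x + y ≥ 275
    · refine ⟨g, by omega, ?_⟩
      cases n <;> simp only [pvRunGo, f21go, if_pos h1]
    · by_cases h2 : t ≥ 4
      · have hn0 : n = 0 := by omega
        subst hn0
        refine ⟨g, by omega, ?_⟩
        simp only [pvRunGo, f21go, if_neg h1, if_pos h2]
      · -- expansion: t ≤ 3, so n = m + 1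
        obtain ⟨m, rfl⟩ : ∃ m, n = m + 1 := ⟨(3 - t).toNat, by omega⟩
        have hm : (4 - (t+1)).toNat = m := by omega
        have hP : 0 < 7 ^ m := by positivity
        have hf' : 14 * 7 ^ m ≤ g + 1 := by
          have : 2 * 7 ^ (m+1) = 14 * 7 ^ m := by ring
          omega
        have step : pvRunGo (g+1) (.eval x y t :: S) R =
            pvRunGo g (.eval x (y*4) (t+1) :: .eval x (y+3) (t+1) :: .eval x (y+7) (t+1) ::
                       .eval (x*4) y (t+1) :: .eval (x+3) y (t+1) :: .eval (x+7) y (t+1) ::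
                       .comb t :: S) R := by
          simp only [pvRunGo, if_neg h1, if_neg h2]
        obtain ⟨g1, hb1, e1⟩ := ih m (by omega) x (y*4) (t+1) hm g _ R (by omega)
        obtain ⟨g2, hb2, e2⟩ := ih m (by omega) x (y+3) (t+1) hm g1 _ _ (by omega)
        obtain ⟨g3, hb3, e3⟩ := ih m (by omega) x (y+7) (t+1) hm g2 _ _ (by omega)
        obtain ⟨g4, hb4, e4⟩ := ih m (by omega) (x*4) y (t+1) hm g3 _ _ (by omega)
        obtain ⟨g5, hb5, e5⟩ := ih m (by omega) (x+3) y (t+1) hm g4 _ _ (by omega)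
        obtain ⟨g6, hb6, e6⟩ := ih m (by omega) (x+7) y (t+1) hm g5 _ _ (by omega)
        obtain ⟨g7, rfl⟩ : ∃ g7, g6 = g7 + 1 := ⟨g6 - 1, by omega⟩
        refine ⟨g7, ?_, ?_⟩
        · have : 2 * 7 ^ (m+1) = 14 * 7 ^ m := by ring
          omega
        · rw [step, e1, e2, e3, e4, e5, e6]
          conv_rhs => rw [show f21go (m+1) x y t =
            (if t % 2 == 0 then
              [f21go m (x+7) y (t+1), f21go m (x+3) y (t+1), f21go m (x*4) y (t+1),
               f21go m x (y+7) (t+1), f21go m x (y+3) (t+1), f21go m x (y*4) (t+1)].all id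
             else
              [f21go m (x+7) y (t+1), f21go m (x+3) y (t+1), f21go m (x*4) y (t+1),
               f21go m x (y+7) (t+1), f21go m x (y+3) (t+1), f21go m x (y*4) (t+1)].any id)
            from by simp only [f21go, if_neg h1, if_neg h2]]
          rfl

-- ===== VERDICT (by name: the statement is the Claim_ definition above) =====
theorem f21_spec : Claim_equal_f21 := by
  intro x y t _ _
  unfold Spec_f21 f21 f21_alt
  obtain ⟨f', _, e⟩ := pvRunGo_eval ((4 - t).toNat) x y t rfl (2 * 7 ^ (4 - t).toNat) [] []
    (le_refl _)
  rw [e, pvRunGo_nil]
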